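-- pv_equiv track=rewrite | github.com/BrasSqrl/OM_Studio | src/quant_studio_monitoring/registry.py | resolve_prediction_column_name
-- ===== SOURCE A (Python) =====
-- def resolve_prediction_column_name(columns: list[str], target_mode: str) -> str | None:
--     if target_mode == "binary":
--         preferred = [
--             "predicted_probability_recommended",
--             "predicted_probability",
--             "predicted_probability_platt",
--             "predicted_probability_isotonic",
--         ]
--         for candidate in preferred:
--             if candidate in columns:
--                 return candidate
--         fallback = [column for column in columns if column.startswith("predicted_probability")]
--         return fallback[0] if fallback else None
--
--     for candidate in ("predicted_value", "predicted_score"):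
--         if candidate in columns:
--             return candidate
--     fallback = [column for column in columns if column.startswith("predicted_")]
--     return fallback[0] if fallback else None
-- ===== SOURCE B (Python) =====
-- def resolve_prediction_column_name(columns: list[str], target_mode: str) -> str | None:
--     if target_mode == "binary":
--         preferred = [
--             "predicted_probability_recommended",
--             "predicted_probability",
--             "predicted_probability_platt",
--             "predicted_probability_isotonic",
--         ]
--         prefix = "predicted_probability"
--     else:
--         preferred = ["predicted_value", "predicted_score"]
--         prefix = "predicted_"
--     seen = [False for _ in preferred]
--     first_prefix = None
--     for column in columns:
--         seen = [True if column == name else b for b, name in zip(seen, preferred)]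
--         if first_prefix is None and column.startswith(prefix):
--             first_prefix = column
--     for flag, name in zip(seen, preferred):
--         if flag:
--             return name
--     return first_prefix
-- ===== Notes on version B (the rewrite author's own statement) =====
-- stated objective: alternative
-- what changed: Instead of A's repeated membership scans over columns (one per preferred name) plus a fallback comprehension, B makes a single pass over columns maintaining a seen-flag per preferred name and the first prefix match, then selects by preference order.
import Mathlib
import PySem

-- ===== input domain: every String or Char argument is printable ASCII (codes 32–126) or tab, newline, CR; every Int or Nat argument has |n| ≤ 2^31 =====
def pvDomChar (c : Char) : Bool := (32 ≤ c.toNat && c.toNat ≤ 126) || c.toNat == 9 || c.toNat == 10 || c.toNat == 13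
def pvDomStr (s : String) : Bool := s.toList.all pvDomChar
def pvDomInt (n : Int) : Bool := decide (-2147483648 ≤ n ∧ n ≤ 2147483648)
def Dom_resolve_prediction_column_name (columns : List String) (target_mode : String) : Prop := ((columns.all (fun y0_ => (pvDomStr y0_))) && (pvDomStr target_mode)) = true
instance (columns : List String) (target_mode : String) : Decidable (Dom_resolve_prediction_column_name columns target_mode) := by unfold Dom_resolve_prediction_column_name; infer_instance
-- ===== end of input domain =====

-- B replaces A's per-candidate membership scans and fallback comprehension with a single pass
-- over columns maintaining seen-flags and the first prefix match (objective: alternative).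


-- ===== PORT A =====
-- A's 'for candidate in preferred: if candidate in columns: return candidate' loop
def pyPrefLoop (prefs : List String) (columns : List String) : Option String :=
  match prefs with
  | [] => none
  | c :: rest => if columns.contains c then some c else pyPrefLoop rest columns

def resolve_prediction_column_name (columns : List String) (target_mode : String) : Option String :=
  if target_mode == "binary" then
    match pyPrefLoop ["predicted_probability_recommended", "predicted_probability",
                      "predicted_probability_platt", "predicted_probability_isotonic"] columns with
    | some c => some c
    | none =>
        (columns.filter (fun column => PySem.Str.startswith column "predicted_probability")).head?
  else
    match pyPrefLoop ["predicted_value", "predicted_score"] columns with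
    | some c => some c
    | none =>
        (columns.filter (fun column => PySem.Str.startswith column "predicted_")).head?

-- ===== PORT B =====
-- one step of B's single pass: update the seen-flags and the first prefix match
def altStep (prefs : List String) (pre : String)
    (acc : List Bool × Option String) (column : String) : List Bool × Option String :=
  (List.zipWith (fun b name => if column == name then true else b) acc.1 prefs,
   match acc.2 with
   | some s => some s
   | none => if PySem.Str.startswith column pre then some column else none)

-- B's final selection loop: first preferred name whose flag is set, else the prefix fallback
def altSelect (pairs : List (Bool × String)) (fp : Option String) : Option String :=
  match pairs with
  | [] => fp
  | (b, name) :: rest => if b then some name else altSelect rest fp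

def resolve_prediction_column_name_alt (columns : List String) (target_mode : String) : Option String :=
  let pp : List String × String :=
    if target_mode == "binary" then
      (["predicted_probability_recommended", "predicted_probability",
        "predicted_probability_platt", "predicted_probability_isotonic"], "predicted_probability")
    else
      (["predicted_value", "predicted_score"], "predicted_")
  let res := columns.foldl (altStep pp.1 pp.2) (pp.1.map (fun _ => false), none)
  altSelect (res.1.zip pp.1) res.2

-- ===== PRECONDITION & SPEC =====
def Spec_resolve_prediction_column_name (columns : List String) (target_mode : String) (out : Option String) : Prop := out = resolve_prediction_column_name_alt columns target_mode
instance (columns : List String) (target_mode : String) (out : Option String) : Decidable (Spec_resolve_prediction_column_name columns target_mode out) := by unfold Spec_resolve_prediction_column_name; infer_instance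

-- ===== CLAIM (what is proved, stated in full; the proofs are below) =====
def Claim_equal_resolve_prediction_column_name : Prop := ∀ (columns : List String) (target_mode : String), Dom_resolve_prediction_column_name columns target_mode → Spec_resolve_prediction_column_name columns target_mode (resolve_prediction_column_name columns target_mode)

-- ===== LEMMAS AND PROOFS =====

theorem zipWith_zipWith_same {α β γ δ : Type} (f : α → β → γ) (g : γ → β → δ) :
    ∀ (xs : List α) (ys : List β),
      List.zipWith g (List.zipWith f xs ys) ys = List.zipWith (fun a b => g (f a b) b) xs ys := by
  intro xs
  induction xs with
  | nil => intro ys; simp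
  | cons x xs ih => intro ys; cases ys <;> simp [ih]

theorem zipWith_fst_of_le {α β : Type} :
    ∀ (xs : List α) (ys : List β), xs.length ≤ ys.length →
      List.zipWith (fun a _ => a) xs ys = xs := by
  intro xs
  induction xs with
  | nil => intro ys _; simp
  | cons x xs ih =>
      intro ys h
      cases ys with
      | nil => simp at h
      | cons y ys => simp only [List.zipWith_cons_cons, List.length_cons] at *; rw [ih ys (by omega)]

-- the single pass computes, for each preferred name, whether it occurs in columns,
-- and the first column starting with the prefix
theorem altFold_spec (prefs : List String) (pre : String) :
    ∀ (cols : List String) (seen : List Bool) (fp : Option String),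
      seen.length ≤ prefs.length →
      cols.foldl (altStep prefs pre) (seen, fp)
        = (List.zipWith (fun b name => b || cols.contains name) seen prefs,
           match fp with
           | some s => some s
           | none => (cols.filter (fun column => PySem.Str.startswith column pre)).head?) := by
  intro cols
  induction cols with
  | nil =>
      intro seen fp h
      simp only [List.foldl_nil, List.contains_nil, Bool.or_false, List.filter_nil, Prod.mk.injEq]
      exact ⟨(zipWith_fst_of_le seen prefs h).symm, by cases fp <;> rfl⟩
  | cons c rest ih =>
      intro seen fp h
      rw [List.foldl_cons, altStep,
        ih _ _ (by rw [List.length_zipWith]; exact Nat.min_le_right _ _),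
        zipWith_zipWith_same, Prod.mk.injEq]
      refine ⟨?_, ?_⟩
      · have hfun : (fun (a : Bool) (b : String) =>
            (if (c == b) = true then true else a) || rest.contains b)
            = (fun (a : Bool) (b : String) => a || (c :: rest).contains b) := by
          funext a b
          by_cases hc : c = b
          · subst hc; simp [List.contains_cons]
          · have h1 : (c == b) = false := by simp [hc]
            simp [h1, Ne.symm hc, List.contains_cons]
        rw [hfun]
      · cases fp with
        | some s => rfl
        | none =>
            simp only [List.filter_cons]
            by_cases hs : PySem.Str.startswith c pre = true
            · rw [if_pos hs, if_pos hs]; rfl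
            · rw [if_neg hs, if_neg hs]

theorem resolve_agree (prefs : List String) (pre : String) (cols : List String) :
    altSelect (((cols.foldl (altStep prefs pre) (prefs.map (fun _ => false), none)).1).zip prefs)
        (cols.foldl (altStep prefs pre) (prefs.map (fun _ => false), none)).2
      = (match pyPrefLoop prefs cols with
         | some c => some c
         | none => (cols.filter (fun column => PySem.Str.startswith column pre)).head?) := by
  rw [altFold_spec prefs pre cols (prefs.map (fun _ => false)) none (by simp)]
  induction prefs with
  | nil => simp [pyPrefLoop, altSelect]
  | cons p ps ih =>
      simp only [List.map_cons, List.zipWith_cons_cons, List.zip_cons_cons, altSelect,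
        Bool.false_or, pyPrefLoop]
      cases h : cols.contains p with
      | true => simp only [h]; rfl
      | false =>
          simp only [h, Bool.false_eq_true, if_false]
          exact ih

-- ===== VERDICT (by name: the statement is the Claim_ definition above) =====
theorem resolve_prediction_column_name_spec : Claim_equal_resolve_prediction_column_name := by
  intro columns target_mode _
  unfold Spec_resolve_prediction_column_name resolve_prediction_column_name
    resolve_prediction_column_name_alt
  by_cases h : (target_mode == "binary") = true <;>
    simp only [h, Bool.false_eq_true, if_true, if_false] <;>
    exact (resolve_agree _ _ _).symm
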